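-- pv_equiv track=rewrite | github.com/IcySnowy16/VForObvious | ProgressTrackerTeleBotz/progress_tracker/progress.py | _normalize_milestones
-- ===== SOURCE A (Python) =====
-- from typing import Any, Dict, Iterable, List
--
-- def _normalize_milestones(values: Iterable[int]) -> List[int]:
--     cleaned: List[int] = []
--     for raw in values:
--         try:
--             value = int(raw)
--         except (TypeError, ValueError):
--             continue
--         cleaned.append(max(0, min(100, value)))
--     return sorted(set(cleaned))
-- ===== SOURCE B (Python) =====
-- from typing import Any, Dict, Iterable, List
--
-- def _normalize_milestones(values: Iterable[int]) -> List[int]: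
--     present = [False] * 101
--     for raw in values:
--         try:
--             value = int(raw)
--         except (TypeError, ValueError):
--             continue
--         present[max(0, min(100, value))] = True
--     return [i for i in range(101) if present[i]]
-- ===== Notes on version B (the rewrite author's own statement) =====
-- stated objective: alternative
-- what changed: Replaces the append-then-sorted(set(...)) pipeline with a 101-entry boolean presence table filled during the loop, emitted by a range scan, so no set and no sort are needed.
import Mathlib
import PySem

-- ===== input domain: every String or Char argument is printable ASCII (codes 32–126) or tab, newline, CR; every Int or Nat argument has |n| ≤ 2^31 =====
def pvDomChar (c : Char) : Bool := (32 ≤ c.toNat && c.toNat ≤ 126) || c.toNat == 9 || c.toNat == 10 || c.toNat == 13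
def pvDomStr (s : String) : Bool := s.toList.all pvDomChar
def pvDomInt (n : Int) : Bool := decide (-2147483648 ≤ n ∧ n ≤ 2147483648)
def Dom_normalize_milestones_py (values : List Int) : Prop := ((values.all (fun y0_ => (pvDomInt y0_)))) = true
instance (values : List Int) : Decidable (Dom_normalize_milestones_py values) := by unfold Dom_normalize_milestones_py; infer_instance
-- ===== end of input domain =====

-- B replaces append + sorted(set(...)) by a 101-entry boolean presence table filled in the
-- loop and read out by a range scan (no set, no sort); equivalence is proved for all inputs.

-- ===== PORT A =====
-- on a List Int argument, int(raw) always succeeds, so the try/except never skips an element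
def normalize_milestones_py (values : List Int) : List Int :=
  let cleaned : List Int :=
    values.foldl (fun acc raw => acc ++ [max 0 (min 100 raw)]) []
  PySem.List.sorted (PySem.Set.ofList cleaned) (fun x => x)

-- ===== PORT B =====
def normalize_milestones_py_alt (values : List Int) : List Int :=
  let present : List Bool :=
    values.foldl (fun present raw =>
      -- clamped index is in [0,100], inside the table of length 101
      PySem.List.pySetD present (max 0 (min 100 raw)) true) (List.replicate 101 false)
  (PySem.List.pyRange 0 101).filter (fun i => PySem.List.pyGetD present i false)

-- ===== PRECONDITION & SPEC =====
def Spec_normalize_milestones_py (values : List Int) (out : List Int) : Prop := out = normalize_milestones_py_alt values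
instance (values : List Int) (out : List Int) : Decidable (Spec_normalize_milestones_py values out) := by unfold Spec_normalize_milestones_py; infer_instance

-- ===== CLAIM (what is proved, stated in full; the proofs are below) =====
def Claim_equal_normalize_milestones_py : Prop := ∀ (values : List Int), Dom_normalize_milestones_py values → Spec_normalize_milestones_py values (normalize_milestones_py values)

-- ===== LEMMAS AND PROOFS =====

-- what the presence table holds after the loop: old entry OR membership in the clamped list
theorem pv_foldl_get (values : List Int) (pres : List Bool) (hlen : pres.length = 101)
    (i : Int) (h0 : 0 ≤ i) (h1 : i < 101) :
    PySem.List.pyGetD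
        (values.foldl (fun p raw => PySem.List.pySetD p (max 0 (min 100 raw)) true) pres) i false
      = (pres.getD i.toNat false || decide (i ∈ values.map (fun v => max 0 (min 100 v)))) := by
  induction values generalizing pres with
  | nil => simp [PySem.List.pyGetD_of_nonneg _ _ h0]
  | cons v vs ih =>
      have hc0 : (0:Int) ≤ max 0 (min 100 v) := le_max_left _ _
      have hset := PySem.List.pySetD_of_nonneg pres (i := max 0 (min 100 v)) true hc0
      rw [List.foldl_cons, ih _ (by rw [PySem.List.length_pySetD]; exact hlen)]
      rw [hset]
      have hn : (max 0 (min 100 v)).toNat < pres.length := by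
        rw [hlen]; omega
      by_cases he : i = max 0 (min 100 v)
      · subst he
        simp [List.getD_eq_getElem?_getD, hn]
      · have hne : (max 0 (min 100 v)).toNat ≠ i.toNat := by omega
        rw [List.getD_eq_getElem?_getD, List.getElem?_set_ne hne, ← List.getD_eq_getElem?_getD]
        simp [he]

-- every clamped value lies in [0,100]
theorem pv_clamp_mem (values : List Int) (x : Int)
    (hx : x ∈ values.map (fun v => max 0 (min 100 v))) : 0 ≤ x ∧ x < 101 := by
  rcases List.mem_map.mp hx with ⟨v, _, rfl⟩
  constructor <;> [exact le_max_left _ _; omega]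

theorem normalize_milestones_py_eq (values : List Int) :
    normalize_milestones_py values = normalize_milestones_py_alt values := by
  unfold normalize_milestones_py normalize_milestones_py_alt
  rw [PySem.List.foldl_append_singleton_eq_map]
  set L := values.map (fun v => max 0 (min 100 v)) with hL
  -- B reduces to filtering the range by membership in L
  have hB : ((PySem.List.pyRange 0 101).filter
        (fun i => PySem.List.pyGetD
          (values.foldl (fun p raw => PySem.List.pySetD p (max 0 (min 100 raw)) true)
            (List.replicate 101 false)) i false))
      = (PySem.List.pyRange 0 101).filter (fun i => decide (i ∈ L)) := by
    apply List.filter_congr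
    intro i hi
    have hir := (PySem.List.mem_pyRange_one).mp hi
    rw [pv_foldl_get values _ (by simp) i hir.1 hir.2]
    have hrep : (List.replicate 101 false).getD i.toNat false = false := by
      rw [List.getD_eq_getElem?_getD, List.getElem?_replicate]
      split <;> rfl
    rw [hrep]
    simp [hL]
  simp only [List.nil_append]
  rw [hB]
  -- the filtered range is the sorted dedup of L
  apply PySem.List.sorted_eq_of_perm_of_pairwise_lt
  · apply (List.perm_ext_iff_of_nodup ((PySem.List.nodup_pyRange_one 0 101).filter _)
      (PySem.Set.nodup_ofList L)).mpr
    intro x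
    rw [List.mem_filter, PySem.Set.mem_ofList, PySem.List.mem_pyRange_one]
    constructor
    · rintro ⟨_, hx⟩; simpa using hx
    · intro hx
      exact ⟨⟨(pv_clamp_mem values x hx).1, (pv_clamp_mem values x hx).2⟩, by simpa using hx⟩
  · exact (PySem.List.pairwise_lt_pyRange_one 0 101).filter _

-- ===== VERDICT (by name: the statement is the Claim_ definition above) =====
theorem normalize_milestones_py_spec : Claim_equal_normalize_milestones_py := by
  intro values _
  unfold Spec_normalize_milestones_py
  exact normalize_milestones_py_eq values
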